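-- pv_equiv track=rewrite | github.com/taaqat/scenario_pipeline | utils/llm_client.py | _bracket_stack
-- ===== SOURCE A (Python) =====
-- def _bracket_stack(text: str) -> list[str]:
--     """Return a stack of unclosed opening delimiters ('{' or '[') in text."""
--     stack = []
--     in_string = False
--     escape = False
--     for ch in text:
--         if escape:
--             escape = False
--             continue
--         if ch == '\\' and in_string:
--             escape = True
--             continue
--         if ch == '"':
--             in_string = not in_string
--             continue
--         if in_string:
--             continue
--         if ch in ('{', '['):
--             stack.append(ch)
--         elif ch == '}' and stack and stack[-1] == '{':
--             stack.pop()
--         elif ch == ']' and stack and stack[-1] == '[':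
--             stack.pop()
--     return stack
-- ===== SOURCE B (Python) =====
-- def _bracket_stack(text: str) -> list[str]:
--     """Return a stack of unclosed opening delimiters ('{' or '[') in text."""
--     stack = []
--     i = 0
--     n = len(text)
--     while i < n:
--         ch = text[i]
--         if ch == '"':
--             # consume the whole string literal as a span
--             i += 1
--             while i < n:
--                 if text[i] == '\\':
--                     i += 2
--                 elif text[i] == '"':
--                     i += 1
--                     break
--                 else:
--                     i += 1
--         else:
--             if ch == '{' or ch == '[':
--                 stack.append(ch)
--             elif ch == '}' and stack and stack[-1] == '{':
--                 stack.pop()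
--             elif ch == ']' and stack and stack[-1] == '[':
--                 stack.pop()
--             i += 1
--     return stack
-- ===== Notes on version B (the rewrite author's own statement) =====
-- stated objective: alternative
-- what changed: B scans with an index and consumes each quoted string literal as a whole span in an inner skip loop (jumping two positions past backslashes), instead of A's per-character state machine with in_string/escape flags.
import Mathlib
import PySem

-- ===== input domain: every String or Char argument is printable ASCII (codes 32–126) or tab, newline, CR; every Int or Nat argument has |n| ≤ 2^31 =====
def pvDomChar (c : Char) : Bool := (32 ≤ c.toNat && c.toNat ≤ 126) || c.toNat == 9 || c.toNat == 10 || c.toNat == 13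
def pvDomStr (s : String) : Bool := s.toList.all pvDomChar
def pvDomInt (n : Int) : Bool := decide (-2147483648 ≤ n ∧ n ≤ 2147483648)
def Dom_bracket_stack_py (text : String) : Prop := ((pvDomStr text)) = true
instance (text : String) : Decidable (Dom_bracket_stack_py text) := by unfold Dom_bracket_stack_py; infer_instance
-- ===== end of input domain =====

-- B replaces A's per-character in_string/escape flag machine by a span-based scanner that
-- consumes each quoted string literal in an inner skip loop (objective: alternative decomposition).

-- ===== PORT A =====
-- A's loop state: (stack, in_string, escape); branches in A's order.
def pvAStep (s : List String × Bool × Bool) (ch : Char) : List String × Bool × Bool :=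
  match s with
  | (stack, in_string, escape) =>
    if escape then (stack, in_string, false)
    else if ch = '\\' ∧ in_string then (stack, in_string, true)
    else if ch = '"' then (stack, !in_string, false)
    else if in_string then (stack, in_string, false)
    else if ch = '{' ∨ ch = '[' then (stack ++ [String.ofList [ch]], in_string, false)
    else if ch = '}' ∧ stack.getLast? = some "{" then (stack.dropLast, in_string, false)
    else if ch = ']' ∧ stack.getLast? = some "[" then (stack.dropLast, in_string, false)
    else (stack, in_string, false)

def bracket_stack_py (text : String) : List String :=
  (text.toList.foldl pvAStep ([], false, false)).1

-- ===== PORT B =====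
-- B's inner while loop: skip the body of a string literal (opening quote already consumed),
-- returning the characters after the literal; '\\' jumps two positions.
def pvSkipStr : List Char → List Char
  | [] => []
  | '\\' :: [] => []
  | '\\' :: _ :: rest => pvSkipStr rest
  | '"' :: rest => rest
  | _ :: rest => pvSkipStr rest

theorem pvSkipStr_length (l : List Char) : (pvSkipStr l).length ≤ l.length := by
  fun_induction pvSkipStr l <;> simp_all <;> omega

-- B's outer while loop over the remaining characters.
def pvBGo (l : List Char) (stack : List String) : List String :=
  match l with
  | [] => stack
  | ch :: rest =>
    if ch = '"' then pvBGo (pvSkipStr rest) stack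
    else pvBGo rest
      (if ch = '{' ∨ ch = '[' then stack ++ [String.ofList [ch]]
       else if ch = '}' ∧ stack.getLast? = some "{" then stack.dropLast
       else if ch = ']' ∧ stack.getLast? = some "[" then stack.dropLast
       else stack)
termination_by l.length
decreasing_by
  · exact Nat.lt_succ_of_le (pvSkipStr_length rest)
  · exact Nat.lt_succ_self _

def bracket_stack_py_alt (text : String) : List String :=
  pvBGo text.toList []

-- ===== PRECONDITION & SPEC =====
def Spec_bracket_stack_py (text : String) (out : List String) : Prop := out = bracket_stack_py_alt text
instance (text : String) (out : List String) : Decidable (Spec_bracket_stack_py text out) := by unfold Spec_bracket_stack_py; infer_instance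

-- ===== CLAIM (what is proved, stated in full; the proofs are below) =====
def Claim_equal_bracket_stack_py : Prop := ∀ (text : String), Dom_bracket_stack_py text → Spec_bracket_stack_py text (bracket_stack_py text)

-- ===== LEMMAS AND PROOFS =====

-- Inside a string literal (in_string = true, escape = false), A's flag machine ends with the
-- same stack as resuming the neutral state after B's span skip.
theorem pvInString (l : List Char) (stack : List String) :
    (l.foldl pvAStep (stack, true, false)).1
      = ((pvSkipStr l).foldl pvAStep (stack, false, false)).1 := by
  fun_induction pvSkipStr l with
  | case1 => simp
  | case2 => simp [pvAStep]
  | case3 c rest ih => simpa [pvAStep] using ih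
  | case4 rest => simp [pvAStep]
  | case5 c rest h1 h2 h3 ih =>
    have hc : c ≠ '\\' := by
      rintro rfl
      cases rest with
      | nil => exact h1 rfl rfl
      | cons a b => exact h2 a b rfl rfl
    have e : pvAStep ((stack, true, false) : List String × Bool × Bool) c
        = (stack, true, false) := by
      simp only [pvAStep]
      rw [if_neg (by simp), if_neg (by simp [hc]), if_neg h3]
      simp
    rw [List.foldl_cons, e]
    exact ih

-- Main invariant: from the neutral state, A's fold computes B's loop.
theorem pvMain (l : List Char) (stack : List String) :
    (l.foldl pvAStep (stack, false, false)).1 = pvBGo l stack := by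
  induction hn : l.length using Nat.strong_induction_on generalizing l stack with
  | _ n ih =>
    match l with
    | [] => simp [pvBGo]
    | ch :: rest =>
      by_cases hq : ch = '"'
      · subst hq
        rw [pvBGo, if_pos rfl]
        have hstep : pvAStep ((stack, false, false) : List String × Bool × Bool) '"'
            = (stack, true, false) := by simp [pvAStep]
        rw [List.foldl_cons, hstep, pvInString rest stack]
        subst hn
        exact ih _ (Nat.lt_succ_of_le (pvSkipStr_length rest)) _ _ rfl
      · rw [pvBGo, if_neg hq]
        have hstep : pvAStep ((stack, false, false) : List String × Bool × Bool) ch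
            = ((if ch = '{' ∨ ch = '[' then stack ++ [String.ofList [ch]]
                else if ch = '}' ∧ stack.getLast? = some "{" then stack.dropLast
                else if ch = ']' ∧ stack.getLast? = some "[" then stack.dropLast
                else stack), false, false) := by
          simp only [pvAStep]
          rw [if_neg (by simp), if_neg (by simp), if_neg hq, if_neg (by simp)]
          split_ifs <;> rfl
        rw [List.foldl_cons, hstep]
        subst hn
        exact ih _ (Nat.lt_succ_self _) _ _ rfl

-- ===== VERDICT (by name: the statement is the Claim_ definition above) =====
theorem bracket_stack_py_spec : Claim_equal_bracket_stack_py := by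
  intro text _
  unfold Spec_bracket_stack_py bracket_stack_py bracket_stack_py_alt
  exact pvMain text.toList []
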